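-- pv_equiv track=rewrite | github.com/pradyGn/BNF-to-CNF-converter-and-DPLL-solver | BNF_CNF.py | doublenots
-- ===== SOURCE A (Python) =====
-- def doublenots(IN, zz):
--     zz = 0
--     for l in IN:
--         for pos in range(len(l)):
--             check = 1
--             num = 0
--             i = 0
--             while check != 0 and (pos+i) < len(l):
--                 check = 0
--                 if l[pos + i] == "!":
--                     num = num + 1
--                     check = 1
--                     i = i + 1
--             if num > 1:
--                 zz = 1
--                 num1 = num%2
--                 if num1 == 0:
--                     newl = l[:pos] + l[pos+num:]
--                 elif num1 == 1:
--                     newl = l[:pos] + "!" + l[pos+num:]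
--                 IN.remove(l)
--                 IN.append(newl)
--                 return IN, zz
--
--     return IN, zz
-- ===== SOURCE B (Python) =====
-- def doublenots(IN, zz):
--     # Single linear scan per line: walk once, tracking each maximal run of '!';
--     # collapse the first run of length > 1 by parity, move that line to the end.
--     # Like A, mutates IN in place (removes the line and appends the rewrite).
--     for idx, l in enumerate(IN):
--         n = len(l)
--         k = 0
--         while k < n:
--             if l[k] == "!":
--                 j = k
--                 while k < n and l[k] == "!":
--                     k += 1
--                 num = k - j
--                 if num > 1:
--                     newl = l[:j] + "!" * (num % 2) + l[k:]
--                     del IN[idx]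
--                     IN.append(newl)
--                     return IN, 1
--             else:
--                 k += 1
--     return IN, 0
-- ===== Notes on version B (the rewrite author's own statement) =====
-- stated objective: faster
-- what changed: A re-counts the '!' run starting at every position of every line (quadratic per line); B makes one linear pass per line, jumping over each maximal '!' run once, and deletes the found line by index instead of searching for it with list.remove.
import Mathlib
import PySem

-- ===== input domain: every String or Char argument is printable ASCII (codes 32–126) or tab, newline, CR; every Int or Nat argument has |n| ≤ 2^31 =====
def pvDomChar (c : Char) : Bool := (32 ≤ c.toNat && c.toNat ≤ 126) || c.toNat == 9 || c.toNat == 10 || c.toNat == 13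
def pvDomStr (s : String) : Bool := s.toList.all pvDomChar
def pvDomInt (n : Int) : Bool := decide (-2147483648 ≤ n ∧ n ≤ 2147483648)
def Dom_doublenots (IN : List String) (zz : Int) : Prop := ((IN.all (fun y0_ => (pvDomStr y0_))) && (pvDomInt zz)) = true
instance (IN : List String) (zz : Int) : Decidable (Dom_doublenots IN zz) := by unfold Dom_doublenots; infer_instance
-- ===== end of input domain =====

-- B replaces A's quadratic per-line re-count (a fresh '!'-run count from every position)
-- by one linear scan per line that jumps over each maximal '!' run, and deletes the found
-- line by index instead of list.remove; both A and B mutate IN the same way (remove+append).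


-- ===== PORT A =====
-- the inner `while check != 0 and (pos+i) < len(l)` loop: when the char is not '!',
-- check is set to 0 and the re-tested condition fails, so the loop exits with num
def pvRunCount (s : List Char) (pos num i : Nat) : Nat :=
  if h : pos + i < s.length then
    if s[pos + i]! = '!' then pvRunCount s pos (num + 1) (i + 1)
    else num
  else num
termination_by s.length - (pos + i)
decreasing_by omega

-- the `for pos in range(len(l))` loop; returns the first (pos, num) with num > 1
def pvFindPos (s : List Char) (pos : Nat) : Option (Nat × Nat) :=
  if pos < s.length then
    let num := pvRunCount s pos 0 0
    if num > 1 then some (pos, num) else pvFindPos s (pos + 1)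
  else none
termination_by s.length - pos

-- the `for l in IN` loop (mutation happens only at the return point)
def pvALoop (IN : List String) (rest : List String) : List String × Int :=
  match rest with
  | [] => (IN, 0)
  | l :: rest' =>
    match pvFindPos l.toList 0 with
    | some (pos, num) =>
      let s := l.toList
      -- slices l[:pos], l[pos+num:] with nonnegative in-range indices: exactly take/drop
      let newl : String :=
        if num % 2 = 0 then String.ofList (s.take pos ++ s.drop (pos + num))
        else String.ofList (s.take pos ++ '!' :: s.drop (pos + num))
      match PySem.List.remove? IN l with
      | some IN' => (IN' ++ [newl], 1)
      | none => (IN ++ [newl], 1)   -- unreachable: l is an element of IN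
    | none => pvALoop IN rest'

def doublenots (IN : List String) (zz : Int) : List String × Int :=
  -- zz is immediately reassigned to 0 by A
  pvALoop IN IN

-- ===== PORT B =====
-- the inner `while k < n and l[k] == "!"` loop: returns the end of the '!' run
def pvRunEnd (s : List Char) (k : Nat) : Nat :=
  if h : k < s.length ∧ s[k]! = '!' then pvRunEnd s (k + 1) else k
termination_by s.length - k
decreasing_by omega

theorem pvRunEnd_ge (s : List Char) (k : Nat) : k ≤ pvRunEnd s k := by
  fun_induction pvRunEnd s k with
  | case1 k h ih => omega
  | case2 k h => omega

-- termination of the outer scan: a run jump strictly advances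
theorem pvRunEnd_gt (s : List Char) (k : Nat) (hk : k < s.length) (hc : s[k]! = '!') :
    k < pvRunEnd s k := by
  rw [pvRunEnd, dif_pos ⟨hk, hc⟩]
  have := pvRunEnd_ge s (k + 1); omega

-- the `while k < n` scan over one line
def pvScanLine (s : List Char) (k : Nat) : Option (Nat × Nat) :=
  if hk : k < s.length then
    if hc : s[k]! = '!' then
      let j := k
      let k' := pvRunEnd s k
      if k' - j > 1 then some (j, k' - j) else pvScanLine s k'
    else pvScanLine s (k + 1)
  else none
termination_by s.length - k
decreasing_by
  · have := pvRunEnd_gt s k hk hc; omega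
  · omega

-- the `for idx, l in enumerate(IN)` loop
def pvBLoop (IN : List String) (idx : Nat) (rest : List String) : List String × Int :=
  match rest with
  | [] => (IN, 0)
  | l :: rest' =>
    match pvScanLine l.toList 0 with
    | some (j, num) =>
      let s := l.toList
      let newl : String :=
        String.ofList (s.take j ++ (if num % 2 = 1 then ['!'] else []) ++ s.drop (j + num))
      -- del IN[idx]; IN.append(newl)
      (IN.take idx ++ IN.drop (idx + 1) ++ [newl], 1)
    | none => pvBLoop IN (idx + 1) rest'

def doublenots_alt (IN : List String) (zz : Int) : List String × Int :=
  pvBLoop IN 0 IN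

-- ===== PRECONDITION & SPEC =====
def Spec_doublenots (IN : List String) (zz : Int) (out : List String × Int) : Prop := out = doublenots_alt IN zz
instance (IN : List String) (zz : Int) (out : List String × Int) : Decidable (Spec_doublenots IN zz out) := by unfold Spec_doublenots; infer_instance

-- ===== CLAIM (what is proved, stated in full; the proofs are below) =====
def Claim_equal_doublenots : Prop := ∀ (IN : List String) (zz : Int), Dom_doublenots IN zz → Spec_doublenots IN zz (doublenots IN zz)

-- ===== LEMMAS AND PROOFS =====

-- A's run count from position pos equals B's run end minus pos
theorem pvRunCount_eq (s : List Char) (pos num i : Nat) :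
    pvRunCount s pos num i = num + (pvRunEnd s (pos + i) - (pos + i)) := by
  fun_induction pvRunCount s pos num i with
  | case1 num i h hc ih =>
    have e : pos + (i + 1) = pos + i + 1 := by omega
    rw [ih, e, show pvRunEnd s (pos + i) = pvRunEnd s (pos + i + 1) by
      rw [pvRunEnd, dif_pos ⟨h, hc⟩]]
    have := pvRunEnd_ge s (pos + i + 1)
    omega
  | case2 num i h hc =>
    rw [pvRunEnd, dif_neg (fun hh => hc hh.2)]
    omega
  | case3 num i h =>
    rw [pvRunEnd, dif_neg (fun hh => h hh.1)]
    omega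

-- A's position-by-position search and B's run-jumping scan find the same answer
theorem pvFindPos_eq_scanLine (s : List Char) (k : Nat) :
    pvFindPos s k = pvScanLine s k := by
  fun_induction pvScanLine s k with
  | case1 k hk hc j k' h =>
    have hj : j = k := rfl
    have hk' : k' = pvRunEnd s k := rfl
    rw [hj, hk'] at h ⊢
    rw [pvFindPos, if_pos hk]
    have hnum : pvRunCount s k 0 0 = pvRunEnd s k - k := by
      simpa using pvRunCount_eq s k 0 0
    simp only [hnum]
    rw [if_pos h]
  | case2 k hk hc j k' h ih =>
    have hj : j = k := rfl
    have hk' : k' = pvRunEnd s k := rfl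
    rw [hj] at h
    rw [hk'] at h ih ⊢
    have hgt := pvRunEnd_gt s k hk hc
    have hend : pvRunEnd s k = k + 1 := by omega
    rw [hend] at ih ⊢
    rw [pvFindPos, if_pos hk]
    have hnum : pvRunCount s k 0 0 = pvRunEnd s k - k := by
      simpa using pvRunCount_eq s k 0 0
    simp only [hnum]
    rw [if_neg (by omega : ¬ pvRunEnd s k - k > 1)]
    exact ih
  | case3 k hk hc ih =>
    rw [pvFindPos, if_pos hk]
    have hnum : pvRunCount s k 0 0 = 0 := by
      rw [pvRunCount]
      simp only [Nat.add_zero]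
      rw [dif_pos hk, if_neg hc]
    simp only [hnum]
    rw [if_neg (by omega)]
    exact ih
  | case4 k hk =>
    rw [pvFindPos, if_neg hk]

-- remove? skips a prefix none of whose elements equals l and removes l itself
theorem pvRemove_prefix (pre rest : List String) (l : String)
    (hpre : ∀ e ∈ pre, e ≠ l) :
    PySem.List.remove? (pre ++ l :: rest) l = some (pre ++ rest) := by
  induction pre with
  | nil => simp
  | cons e pre ih =>
    have hne : e ≠ l := hpre e (by simp)
    simp only [List.cons_append]
    rw [PySem.List.remove?_cons_of_ne _ hne]
    rw [ih (fun x hx => hpre x (by simp [hx]))]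
    rfl

-- the two outer loops agree, given the invariant IN = pre ++ rest with no match in pre
theorem pvLoop_eq (rest pre : List String)
    (hpre : ∀ e ∈ pre, pvScanLine e.toList 0 = none) :
    pvALoop (pre ++ rest) rest = pvBLoop (pre ++ rest) pre.length rest := by
  induction rest generalizing pre with
  | nil => simp [pvALoop, pvBLoop]
  | cons l rest' ih =>
    rw [pvALoop, pvBLoop, pvFindPos_eq_scanLine]
    cases hscan : pvScanLine l.toList 0 with
    | none =>
      have := ih (pre ++ [l]) (by
        intro e he
        rcases List.mem_append.mp he with h | h
        · exact hpre e h
        · simp at h; subst h; exact hscan)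
      simpa using this
    | some p =>
      obtain ⟨pos, num⟩ := p
      simp only
      have hne : ∀ e ∈ pre, e ≠ l := by
        intro e he heq
        have h1 := hpre e he
        rw [heq, hscan] at h1
        simp at h1
      rw [pvRemove_prefix pre rest' l hne]
      have ht : (pre ++ l :: rest').take pre.length = pre := by
        rw [List.take_left']
        rfl
      have hd : (pre ++ l :: rest').drop (pre.length + 1) = rest' := by
        rw [show pre ++ l :: rest' = (pre ++ [l]) ++ rest' by simp, List.drop_left']
        simp
      rw [ht, hd]
      rcases Nat.mod_two_eq_zero_or_one num with h2 | h2 <;> simp [h2]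

-- ===== VERDICT (by name: the statement is the Claim_ definition above) =====
theorem doublenots_spec : Claim_equal_doublenots := by
  intro IN zz _
  unfold Spec_doublenots doublenots doublenots_alt
  simpa using pvLoop_eq IN [] (by simp)
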